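-- pv_equiv track=rewrite | github.com/NickN9N/Nxm-Nim-Matura.py | nxm tree number simple.py | categorize_matrices
-- ===== SOURCE A (Python) =====
-- def generate_symmetries(matrix):
--     symmetries = set()
--     height = len(matrix)
--     width = len(matrix[0])
--
--     def add_symmetries(mat):
--         symmetries.add(tuple(map(tuple, mat)))
--
--     add_symmetries(matrix)
--     add_symmetries([row[::-1] for row in matrix])
--     add_symmetries(matrix[::-1])
--     add_symmetries([row[::-1] for row in matrix[::-1]])
--     add_symmetries(list(zip(*matrix[::-1])))
--     add_symmetries(list(zip(*matrix))[::-1])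
--
--     return symmetries
--
-- def categorize_matrices(matrices):
--     unique_matrices = []
--     seen_symmetries = set()
--
--     for matrix in matrices:
--         symmetries = generate_symmetries(matrix)
--         if not seen_symmetries.intersection(symmetries):
--             unique_matrices.append(matrix)
--             seen_symmetries.update(symmetries)
--
--     return unique_matrices
-- ===== SOURCE B (Python) =====
-- def categorize_matrices(matrices):
--     def variants(m):
--         return [m,
--                 [r[::-1] for r in m],
--                 m[::-1],
--                 [r[::-1] for r in m[::-1]],
--                 [list(c) for c in zip(*m[::-1])],
--                 [list(c) for c in zip(*m)][::-1]]
--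
--     def go(ms):
--         if not ms:
--             return []
--         head, rest = ms[0], ms[1:]
--         vh = variants(head)
--         return [head] + go([x for x in rest
--                             if all(v not in vh for v in variants(x))])
--
--     return go(matrices)
-- ===== Notes on version B (the rewrite author's own statement) =====
-- stated objective: alternative
-- what changed: A is a single pass that accumulates a global set of every symmetry variant ever seen and tests each matrix by set intersection; B is a recursive select-and-filter: keep the head matrix and recurse on the remainder with every matrix that shares a variant with the head filtered out, so no seen-set or accumulator is maintained at all.
import Mathlib
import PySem

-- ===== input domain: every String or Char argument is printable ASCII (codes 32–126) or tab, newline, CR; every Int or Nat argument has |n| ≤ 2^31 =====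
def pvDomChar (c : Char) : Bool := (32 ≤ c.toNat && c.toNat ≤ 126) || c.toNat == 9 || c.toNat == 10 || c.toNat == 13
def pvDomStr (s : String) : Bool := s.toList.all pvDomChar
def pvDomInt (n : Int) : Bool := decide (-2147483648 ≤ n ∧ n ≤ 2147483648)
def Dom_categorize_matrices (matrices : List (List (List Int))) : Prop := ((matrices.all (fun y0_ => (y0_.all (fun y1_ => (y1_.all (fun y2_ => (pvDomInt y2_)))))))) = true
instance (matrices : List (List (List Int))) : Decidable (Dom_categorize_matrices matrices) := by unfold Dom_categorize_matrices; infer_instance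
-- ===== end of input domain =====

-- B replaces A's single pass with a global accumulated seen-set (tested by set
-- intersection) by a recursive select-and-filter with no accumulator: keep the
-- head, drop every later matrix sharing a variant with it, recurse; objective:
-- alternative (no speed claim).


-- ===== PORT A =====
-- Hand port of Python's zip(*rows) on a list of rows of ints: one output row per
-- column index below the SHORTEST row's length (zip truncates); zip of an empty
-- argument list is []. Exact for every input, rectangular or ragged.
def pyZipStar (rows : List (List Int)) : List (List Int) :=
  match rows with
  | [] => []
  | r :: rs =>
      (List.range (rs.foldl (fun n s => Nat.min n s.length) r.length)).map
        (fun i => (r :: rs).map (fun s => s.getD i 0))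

-- generate_symmetries: six add_symmetries calls on a fresh set, in source order
-- (row[::-1] and matrix[::-1] are list reversals).
def generateSymmetries (matrix : List (List Int)) : PySem.Set (List (List Int)) :=
  PySem.Set.add (PySem.Set.add (PySem.Set.add (PySem.Set.add (PySem.Set.add (PySem.Set.add
    PySem.Set.empty
    matrix)
    (matrix.map List.reverse))
    matrix.reverse)
    (matrix.reverse.map List.reverse))
    (pyZipStar matrix.reverse))
    (pyZipStar matrix).reverse

-- loop body of A: keep matrix unless seen_symmetries ∩ symmetries is nonempty
def stepA (st : List (List (List Int)) × PySem.Set (List (List Int)))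
    (matrix : List (List Int)) : List (List (List Int)) × PySem.Set (List (List Int)) :=
  let symmetries := generateSymmetries matrix
  if (PySem.Set.inter st.2 symmetries).isEmpty then
    (st.1 ++ [matrix], PySem.Set.update st.2 symmetries)
  else st

def categorize_matrices (matrices : List (List (List Int))) : List (List (List Int)) :=
  (matrices.foldl stepA ([], PySem.Set.empty)).1

-- ===== PORT B =====
-- the six symmetry variants of Source B's `variants`, as a plain list
def variantsB (m : List (List Int)) : List (List (List Int)) :=
  [m, m.map List.reverse, m.reverse, m.reverse.map List.reverse,
   pyZipStar m.reverse, (pyZipStar m).reverse]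

-- Source B's recursive `go`: keep the head, recurse on the rest with every matrix
-- sharing a variant with the head filtered out
def goB (ms : List (List (List Int))) : List (List (List Int)) :=
  match ms with
  | [] => []
  | head :: rest =>
      head :: goB (rest.filter
        (fun x => (variantsB x).all (fun v => !((variantsB head).contains v))))
termination_by ms.length
decreasing_by simpa using Nat.lt_succ_of_le (List.length_filter_le _ _)

def categorize_matrices_alt (matrices : List (List (List Int))) : List (List (List Int)) :=
  goB matrices

-- ===== PRECONDITION & SPEC =====
-- Python A evaluates len(matrix[0]) and raises IndexError on a matrix with no
-- rows; Pre_ excludes exactly the inputs containing an empty matrix.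
def Pre_categorize_matrices (matrices : List (List (List Int))) : Prop :=
  ∀ m ∈ matrices, m ≠ []
instance (matrices : List (List (List Int))) : Decidable (Pre_categorize_matrices matrices) := by
  unfold Pre_categorize_matrices; infer_instance

def pvWitness_categorize_matrices : List (List (List Int)) := [[[1, 2], [3, 4]], [[3, 1], [4, 2]]]

def Spec_categorize_matrices (matrices : List (List (List Int))) (out : List (List (List Int))) : Prop := out = categorize_matrices_alt matrices
instance (matrices : List (List (List Int))) (out : List (List (List Int))) : Decidable (Spec_categorize_matrices matrices out) := by unfold Spec_categorize_matrices; infer_instance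

-- ===== CLAIM =====
def Claim_equal_categorize_matrices : Prop := ∀ (matrices : List (List (List Int))), Dom_categorize_matrices matrices → Pre_categorize_matrices matrices → Spec_categorize_matrices matrices (categorize_matrices matrices)

-- ===== LEMMAS AND PROOFS =====

-- "no variant of m lies in the variant list of any representative in R"
def okB (R : List (List (List Int))) (m : List (List Int)) : Bool :=
  R.all (fun k => (variantsB m).all (fun v => !((variantsB k).contains v)))

-- lazy rep-list version of A's loop: keep m iff okB against the kept reps so far
def auxA (R : List (List (List Int))) (ms : List (List (List Int))) : List (List (List Int)) :=
  match ms with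
  | [] => []
  | m :: rest => if okB R m then m :: auxA (R ++ [m]) rest else auxA R rest

theorem mem_generateSymmetries (m x : List (List Int)) :
    x ∈ generateSymmetries m ↔ x ∈ variantsB m := by
  simp [generateSymmetries, variantsB, PySem.Set.mem_add, PySem.Set.empty]
  tauto

theorem condA_iff (s : PySem.Set (List (List Int))) (m : List (List Int))
    (R : List (List (List Int)))
    (h2 : ∀ x, x ∈ s ↔ ∃ k ∈ R, x ∈ variantsB k) :
    ((PySem.Set.inter s (generateSymmetries m)).isEmpty = true) ↔ okB R m = true := by
  rw [List.isEmpty_iff, List.eq_nil_iff_forall_not_mem]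
  simp only [okB, List.all_eq_true, Bool.not_eq_true', ← Bool.not_eq_true,
    List.contains_eq_mem, decide_eq_true_eq]
  constructor
  · intro h k hk v hv hvk
    refine h v ?_
    rw [PySem.Set.mem_inter]
    exact ⟨(h2 v).2 ⟨k, hk, hvk⟩, (mem_generateSymmetries m v).2 hv⟩
  · intro h x hx
    rw [PySem.Set.mem_inter] at hx
    obtain ⟨k, hk, hxk⟩ := (h2 x).1 hx.1
    exact h k hk x ((mem_generateSymmetries m x).1 hx.2) hxk

-- A's fold equals the lazy rep-list recursion
theorem foldA_eq_auxA (ms : List (List (List Int)))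
    (st : List (List (List Int)) × PySem.Set (List (List Int)))
    (R : List (List (List Int)))
    (h2 : ∀ x, x ∈ st.2 ↔ ∃ k ∈ R, x ∈ variantsB k) :
    (ms.foldl stepA st).1 = st.1 ++ auxA R ms := by
  induction ms generalizing st R with
  | nil => simp [auxA]
  | cons m rest ih =>
    simp only [List.foldl_cons, auxA]
    by_cases hc : okB R m = true
    · have hA : (PySem.Set.inter st.2 (generateSymmetries m)).isEmpty = true :=
        (condA_iff st.2 m R h2).2 hc
      have eA : stepA st m = (st.1 ++ [m], PySem.Set.update st.2 (generateSymmetries m)) := by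
        simp only [stepA]; rw [if_pos hA]
      rw [eA, if_pos hc, ih _ (R ++ [m]) ?_]
      · simp
      · intro x
        simp only [PySem.Set.mem_update, h2 x, mem_generateSymmetries, List.mem_append,
          List.mem_singleton]
        constructor
        · rintro (⟨k, hk, hxk⟩ | hx)
          · exact ⟨k, Or.inl hk, hxk⟩
          · exact ⟨m, Or.inr rfl, hx⟩
        · rintro ⟨k, hk | hk, hxk⟩
          · exact Or.inl ⟨k, hk, hxk⟩
          · subst hk; exact Or.inr hxk
    · have hA : ¬ ((PySem.Set.inter st.2 (generateSymmetries m)).isEmpty = true) :=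
        fun h => hc ((condA_iff st.2 m R h2).1 h)
      have eA : stepA st m = st := by simp only [stepA]; rw [if_neg hA]
      rw [eA, if_neg hc]
      exact ih st R h2

theorem okB_append (R : List (List (List Int))) (m x : List (List Int)) :
    okB (R ++ [m]) x = (okB R x && okB [m] x) := by
  simp [okB]

-- the lazy rep-list recursion equals B's eager filtering recursion
theorem auxA_eq_goB_bounded (n : Nat) :
    ∀ (ms R : List (List (List Int))), ms.length ≤ n →
      auxA R ms = goB (ms.filter (okB R)) := by
  induction n with
  | zero =>
    intro ms R h
    have : ms = [] := List.eq_nil_of_length_eq_zero (Nat.le_zero.1 h)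
    subst this; simp [auxA, goB]
  | succ n ih =>
    intro ms R h
    match ms with
    | [] => simp [auxA, goB]
    | m :: rest =>
      have hrest : rest.length ≤ n := Nat.le_of_succ_le_succ (by simpa using h)
      by_cases hc : okB R m = true
      · rw [auxA, if_pos hc, List.filter_cons_of_pos hc, goB]
        congr 1
        rw [ih rest (R ++ [m]) hrest]
        congr 1
        rw [List.filter_filter]
        apply List.filter_congr
        intro x _
        rw [okB_append]
        have hm : okB [m] x = (variantsB x).all (fun v => !((variantsB m).contains v)) := by
          simp [okB]
        rw [hm, Bool.and_comm]
      · rw [auxA, if_neg hc, List.filter_cons_of_neg hc]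
        exact ih rest R hrest

theorem auxA_eq_goB (ms R : List (List (List Int))) :
    auxA R ms = goB (ms.filter (okB R)) :=
  auxA_eq_goB_bounded ms.length ms R (Nat.le_refl _)

theorem okB_nil (x : List (List Int)) : okB [] x = true := by simp [okB]

-- ===== VERDICT =====
theorem categorize_matrices_spec : Claim_equal_categorize_matrices := by
  intro matrices _ _
  unfold Spec_categorize_matrices categorize_matrices categorize_matrices_alt
  rw [foldA_eq_auxA matrices ([], PySem.Set.empty) [] (by simp [PySem.Set.empty]),
    auxA_eq_goB, List.filter_eq_self.2 (fun x _ => okB_nil x)]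
  rfl
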